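-- pv_equiv track=rewrite | github.com/realhackcraft/RPyG | src/classes/structure.py | parse_structure_header
-- ===== SOURCE A (Python) =====
-- from typing import List, Tuple
--
-- def parse_structure_header(text: str) -> Tuple[str, List[str], str, str]:
--   args = text.split(", ") # Split the arguments with comma and space
--   colors = transparent = symbol = ""
--   structures = []
--
--   for arg in args:
--     name = arg[0] # Name of the arg
--     arg = arg[3:].strip() # Arg after the name, colon and space
--     match name:
--       case "C":
--         colors = arg
--       case "I":
--         structures = arg.split("; ")
--       case "T":
--         transparent = arg
--       case "S":
--         symbol = arg
--
--   return (colors, structures, transparent, symbol)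
-- ===== SOURCE B (Python) =====
-- def parse_structure_header(text):
--   args = text.split(", ")
--
--   def last_value(key):
--     # last-wins: scan from the end, return first arg starting with key
--     for arg in reversed(args):
--       if arg[:1] == key:
--         return arg[3:].strip()
--     return None
--
--   i = last_value("I")
--   return (last_value("C") or "",
--           i.split("; ") if i is not None else [],
--           last_value("T") or "",
--           last_value("S") or "")
-- ===== Notes on version B (the rewrite author's own statement) =====
-- stated objective: alternative
-- what changed: Replaces A's single forward pass with four mutable accumulators and a match dispatch by four independent backward searches: each field is read directly as the last argument whose first letter matches its key (last-wins preserved by scanning the reversed list and stopping at the first hit).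
import Mathlib
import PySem

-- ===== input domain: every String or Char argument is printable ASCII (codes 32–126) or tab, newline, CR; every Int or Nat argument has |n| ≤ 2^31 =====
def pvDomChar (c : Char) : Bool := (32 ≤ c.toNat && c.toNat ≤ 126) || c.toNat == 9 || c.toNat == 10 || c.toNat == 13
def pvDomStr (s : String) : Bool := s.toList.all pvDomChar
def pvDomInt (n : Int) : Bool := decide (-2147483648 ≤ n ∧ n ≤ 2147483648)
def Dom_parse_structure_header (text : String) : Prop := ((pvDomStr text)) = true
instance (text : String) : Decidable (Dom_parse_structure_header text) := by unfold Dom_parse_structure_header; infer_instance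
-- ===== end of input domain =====

-- B replaces A's single forward pass with four mutable accumulators by four independent
-- backward searches (each field = last argument whose first letter matches its key); alternative decomposition.

-- ===== PORT A =====
-- one iteration of A's for-loop; arg[0] is pyGet? (none = IndexError, excluded by Pre_)
def pvStepA (st : String × List String × String × String) (arg : String) :
    String × List String × String × String :=
  match PySem.Str.pyGet? arg 0 with
  | none => st
  | some name =>
    let v := PySem.Str.strip (PySem.Str.slice arg (some 3) none)
    if name = 'C' then (v, st.2.1, st.2.2.1, st.2.2.2)
    else if name = 'I' then (st.1, (PySem.Str.split? v "; ").getD [], st.2.2.1, st.2.2.2)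
    else if name = 'T' then (st.1, st.2.1, v, st.2.2.2)
    else if name = 'S' then (st.1, st.2.1, st.2.2.1, v)
    else st

def parse_structure_header (text : String) : String × List String × String × String :=
  ((PySem.Str.split? text ", ").getD []).foldl pvStepA ("", [], "", "")

-- ===== PORT B =====
-- B's inner loop last_value(key): first match in the reversed args, arg[:1] == key
def pvLastValue (key : String) : List String → Option String
  | [] => none
  | a :: t =>
    if PySem.Str.slice a none (some 1) = key then
      some (PySem.Str.strip (PySem.Str.slice a (some 3) none))
    else pvLastValue key t

def parse_structure_header_alt (text : String) : String × List String × String × String :=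
  let args := ((PySem.Str.split? text ", ").getD []).reverse   -- reversed(args)
  let i := pvLastValue "I" args
  ((pvLastValue "C" args).getD "",
   (match i with | some v => (PySem.Str.split? v "; ").getD [] | none => []),
   (pvLastValue "T" args).getD "",
   (pvLastValue "S" args).getD "")

-- ===== PRECONDITION & SPEC =====
-- Pre_ excludes texts where some comma-space-separated argument is empty: there arg[0] raises IndexError in A.
def Pre_parse_structure_header (text : String) : Prop :=
  ∀ arg ∈ (PySem.Str.split? text ", ").getD [], arg ≠ ""
instance (text : String) : Decidable (Pre_parse_structure_header text) := by
  unfold Pre_parse_structure_header; infer_instance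
def pvWitness_parse_structure_header : String := "C: red, I: a; b, T: y, S: #"

def Spec_parse_structure_header (text : String) (out : String × List String × String × String) : Prop := out = parse_structure_header_alt text
instance (text : String) (out : String × List String × String × String) : Decidable (Spec_parse_structure_header text out) := by unfold Spec_parse_structure_header; infer_instance

-- ===== CLAIM =====
def Claim_equal_parse_structure_header : Prop := ∀ (text : String), Dom_parse_structure_header text → Pre_parse_structure_header text → Spec_parse_structure_header text (parse_structure_header text)

-- ===== LEMMAS AND PROOFS =====

-- arg[:1] == "<k>" for a single-char key agrees with arg[0] == k; "" matches no key
lemma pvSlice_one_eq (a : String) (k : Char) :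
    (PySem.Str.slice a none (some 1) = String.ofList [k]) ↔ PySem.Str.pyGet? a 0 = some k := by
  rw [← String.toList_inj]
  simp
  rw [PySem.List.slice_to (xs := a.toList) (b := 1) (by norm_num)]
  cases a.toList <;> simp [PySem.List.pyGet?, PySem.List.pyIdx?]

-- searching an appended singleton: look in the singleton first after reversal is append at the right
lemma pvLastValue_append (key : String) (l l' : List String) :
    pvLastValue key (l ++ l') =
      (pvLastValue key l).elim (pvLastValue key l') some := by
  induction l with
  | nil => simp [pvLastValue]
  | cons a t ih =>
    by_cases h : PySem.Str.slice a none (some 1) = key <;> simp [pvLastValue, h, ih]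

-- pvStepA's result componentwise as a one-element search, for any state
lemma pvStep_components (st : String × List String × String × String) (a : String) :
    pvStepA st a =
      ((pvLastValue "C" [a]).getD st.1,
       ((pvLastValue "I" [a]).map
          (fun v => (PySem.Str.split? v "; ").getD [])).getD st.2.1,
       (pvLastValue "T" [a]).getD st.2.2.1,
       (pvLastValue "S" [a]).getD st.2.2.2) := by
  have hC := pvSlice_one_eq a 'C'
  have hI := pvSlice_one_eq a 'I'
  have hT := pvSlice_one_eq a 'T'
  have hS := pvSlice_one_eq a 'S'
  unfold pvStepA pvLastValue
  cases hg : PySem.Str.pyGet? a 0 with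
  | none => simp_all [pvLastValue]
  | some name =>
    by_cases h1 : name = 'C' <;> by_cases h2 : name = 'I' <;>
      by_cases h3 : name = 'T' <;> by_cases h4 : name = 'S' <;>
      simp_all [pvLastValue]

-- A's foldl over args equals B's four backward searches, for any start state
lemma pvMain (args : List String) (st : String × List String × String × String) :
    args.foldl pvStepA st =
      ((pvLastValue "C" args.reverse).getD st.1,
       ((pvLastValue "I" args.reverse).map
          (fun v => (PySem.Str.split? v "; ").getD [])).getD st.2.1,
       (pvLastValue "T" args.reverse).getD st.2.2.1,
       (pvLastValue "S" args.reverse).getD st.2.2.2) := by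
  induction args generalizing st with
  | nil => simp [pvLastValue]
  | cons a t ih =>
    simp only [List.foldl_cons, List.reverse_cons, pvLastValue_append, ih]
    rw [pvStep_components]
    cases pvLastValue "C" t.reverse <;> cases pvLastValue "I" t.reverse <;>
      cases pvLastValue "T" t.reverse <;> cases pvLastValue "S" t.reverse <;>
      simp [Option.elim, pvLastValue]

-- ===== VERDICT =====
theorem parse_structure_header_spec : Claim_equal_parse_structure_header := by
  intro text _ _
  unfold Spec_parse_structure_header parse_structure_header parse_structure_header_alt
  rw [pvMain]
  cases h : pvLastValue "I" (((PySem.Str.split? text ", ").getD []).reverse) <;> simp [h]
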